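-- pv_equiv track=rewrite | github.com/jiangling12138/Framework | test.py | detect_checkpoint_type
-- ===== SOURCE A (Python) =====
-- def detect_checkpoint_type(state):
--     if isinstance(state, dict):
--         keys = list(state.keys())
--         # PPO agent likely has keys like 'critic.0.weight', 'actor_mean.0.weight', 'actor_logstd'
--         if any(k.startswith("critic") or k.startswith("actor_mean") or k == "actor_logstd" for k in keys):
--             return "ppo_agent"
--         # SAC bundle: contains 'actor' and 'qf1' etc
--         if "actor" in state and ("qf1" in state or "qf2" in state):
--             return "sac_bundle"
--         # SAC actor alone: keys like 'fc1.weight' or 'fc_mean.weight' etc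
--         if any(k.startswith("fc1") or k.startswith("fc_mean") or k.startswith("fc_logstd") for k in keys):
--             return "sac_actor"
--         # DQN: keys often include 'network' or 'net' prefixes
--         if any(k.startswith("network") or k.startswith("net") or k.startswith("model") for k in keys):
--             return "dqn"
--     return "unknown"
-- ===== SOURCE B (Python) =====
-- _RULES = (("critic", 0), ("actor_mean", 0), ("fc1", 2), ("fc_mean", 2),
--           ("fc_logstd", 2), ("network", 3), ("net", 3), ("model", 3))
-- _VERDICT = {0: "ppo_agent", 1: "sac_bundle", 2: "sac_actor", 3: "dqn"}
--
-- def _rank(k):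
--     # best (smallest) category rank this single key can witness; 5 = none
--     r = 0 if k == "actor_logstd" else 5
--     for prefix, pr in _RULES:
--         if pr < r and k.startswith(prefix):
--             r = pr
--     return r
--
-- def detect_checkpoint_type(state):
--     if not isinstance(state, dict):
--         return "unknown"
--     best = min((_rank(k) for k in state), default=5)
--     if "actor" in state and ("qf1" in state or "qf2" in state):
--         best = min(best, 1)
--     return _VERDICT.get(best, "unknown")
-- ===== Notes on version B (the rewrite author's own statement) =====
-- stated objective: alternative
-- what changed: Replaces A's priority chain of four any()-scans by a data-driven formulation: a prefix-rule table assigns each key a numeric priority rank, the minimum rank over all keys (merged with the bundle condition as rank 1) indexes a verdict table.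
import Mathlib
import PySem

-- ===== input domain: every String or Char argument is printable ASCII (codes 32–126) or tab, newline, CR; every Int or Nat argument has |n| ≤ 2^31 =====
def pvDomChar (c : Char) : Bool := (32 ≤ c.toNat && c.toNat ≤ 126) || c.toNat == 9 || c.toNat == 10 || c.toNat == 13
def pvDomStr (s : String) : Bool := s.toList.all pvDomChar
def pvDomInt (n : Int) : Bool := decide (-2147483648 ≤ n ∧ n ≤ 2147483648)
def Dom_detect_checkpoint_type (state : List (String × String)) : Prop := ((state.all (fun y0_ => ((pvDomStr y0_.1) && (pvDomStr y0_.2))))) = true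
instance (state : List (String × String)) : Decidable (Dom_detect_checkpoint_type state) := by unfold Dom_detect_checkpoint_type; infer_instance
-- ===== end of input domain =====

-- B replaces A's chain of category-wise any-scans by a data-driven formulation: a rule
-- table maps key prefixes to numeric priorities, each key gets the best rank it witnesses,
-- the minimum rank over all keys (merged with the bundle condition) indexes a verdict
-- table (objective: alternative).

-- ===== PORT A =====
-- A's per-key generator conditions
def pvPpoKey (k : String) : Bool :=
  PySem.Str.startswith k "critic" || PySem.Str.startswith k "actor_mean" || k == "actor_logstd"
def pvSacKey (k : String) : Bool :=
  PySem.Str.startswith k "fc1" || PySem.Str.startswith k "fc_mean" || PySem.Str.startswith k "fc_logstd"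
def pvDqnKey (k : String) : Bool :=
  PySem.Str.startswith k "network" || PySem.Str.startswith k "net" || PySem.Str.startswith k "model"

def detect_checkpoint_type (state : List (String × String)) : String :=
  -- keys = list(state.keys()) : dict keys, first occurrences in order
  if (PySem.List.dedup (state.map Prod.fst)).any pvPpoKey then "ppo_agent"
  else if (PySem.List.dedup (state.map Prod.fst)).contains "actor"
       && ((PySem.List.dedup (state.map Prod.fst)).contains "qf1"
           || (PySem.List.dedup (state.map Prod.fst)).contains "qf2") then "sac_bundle"
  else if (PySem.List.dedup (state.map Prod.fst)).any pvSacKey then "sac_actor"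
  else if (PySem.List.dedup (state.map Prod.fst)).any pvDqnKey then "dqn"
  else "unknown"

-- ===== PORT B =====
-- Source B's module-level rule and verdict tables
def pvRules : List (String × Nat) :=
  [("critic", 0), ("actor_mean", 0), ("fc1", 2), ("fc_mean", 2),
   ("fc_logstd", 2), ("network", 3), ("net", 3), ("model", 3)]
def pvVerdict : PySem.Dict Nat String :=
  PySem.Dict.ofList [(0, "ppo_agent"), (1, "sac_bundle"), (2, "sac_actor"), (3, "dqn")]

-- _rank(k): fold over the rule table
def pvRank (k : String) : Nat :=
  pvRules.foldl
    (fun r pp => if pp.2 < r && PySem.Str.startswith k pp.1 then pp.2 else r)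
    (if k == "actor_logstd" then 0 else 5)

-- best = min((_rank(k) for k in state), default=5), lowered to 1 on the bundle condition,
-- then looked up in the verdict table (dict iteration = dedup of the keys, in order)
def detect_checkpoint_type_alt (state : List (String × String)) : String :=
  pvVerdict.getD
    (if (PySem.List.dedup (state.map Prod.fst)).contains "actor"
        && ((PySem.List.dedup (state.map Prod.fst)).contains "qf1"
            || (PySem.List.dedup (state.map Prod.fst)).contains "qf2")
     then min (PySem.List.minD ((PySem.List.dedup (state.map Prod.fst)).map pvRank) (fun y => y) 5) 1
     else PySem.List.minD ((PySem.List.dedup (state.map Prod.fst)).map pvRank) (fun y => y) 5)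
    "unknown"

-- ===== PRECONDITION & SPEC =====
def Spec_detect_checkpoint_type (state : List (String × String)) (out : String) : Prop := out = detect_checkpoint_type_alt state
instance (state : List (String × String)) (out : String) : Decidable (Spec_detect_checkpoint_type state out) := by unfold Spec_detect_checkpoint_type; infer_instance

-- ===== CLAIM =====
def Claim_equal_detect_checkpoint_type : Prop := ∀ (state : List (String × String)), Dom_detect_checkpoint_type state → Spec_detect_checkpoint_type state (detect_checkpoint_type state)

-- ===== LEMMAS AND PROOFS =====

-- the loop body of Source B's _rank, named for the lemmas below
def pvStep (k : String) : Nat → String × Nat → Nat :=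
  fun r pp => if pp.2 < r && PySem.Str.startswith k pp.1 then pp.2 else r

theorem pvRank_def (k : String) :
    pvRank k = pvRules.foldl (pvStep k) (if k == "actor_logstd" then 0 else 5) := rfl

-- a rank of 0 can never be lowered
theorem pvStep_zero (k : String) (l : List (String × Nat)) : l.foldl (pvStep k) 0 = 0 := by
  induction l with
  | nil => rfl
  | cons hd tl ih => simp [pvStep, ih]

-- the two ppo-prefix rules from the initial exact-match rank
theorem pvStep_ppo (k : String) :
    [(("critic" : String), (0 : Nat)), ("actor_mean", 0)].foldl (pvStep k)
      (if k == "actor_logstd" then 0 else 5)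
      = (if pvPpoKey k then 0 else 5) := by
  cases h0 : (k == "actor_logstd") <;>
  cases h1 : PySem.Str.startswith k "critic" <;>
  cases h2 : PySem.Str.startswith k "actor_mean" <;>
  simp_all [pvStep, pvPpoKey]

-- the three sac-prefix rules from rank 5
theorem pvStep_sac (k : String) :
    [(("fc1" : String), (2 : Nat)), ("fc_mean", 2), ("fc_logstd", 2)].foldl (pvStep k) 5
      = (if pvSacKey k then 2 else 5) := by
  cases h1 : PySem.Str.startswith k "fc1" <;>
  cases h2 : PySem.Str.startswith k "fc_mean" <;>
  cases h3 : PySem.Str.startswith k "fc_logstd" <;>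
  simp_all [pvStep, pvSacKey]

-- the three dqn-prefix rules from rank 5
theorem pvStep_dqn (k : String) :
    [(("network" : String), (3 : Nat)), ("net", 3), ("model", 3)].foldl (pvStep k) 5
      = (if pvDqnKey k then 3 else 5) := by
  cases h1 : PySem.Str.startswith k "network" <;>
  cases h2 : PySem.Str.startswith k "net" <;>
  cases h3 : PySem.Str.startswith k "model" <;>
  simp_all [pvStep, pvDqnKey]

-- the rule-table fold computes the chained classification of a single key
theorem pvRank_eq (k : String) :
    pvRank k = (if pvPpoKey k then 0 else if pvSacKey k then 2 else if pvDqnKey k then 3 else 5) := by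
  rw [pvRank_def,
      show pvRules = [(("critic" : String), (0 : Nat)), ("actor_mean", 0)] ++
        ([(("fc1" : String), (2 : Nat)), ("fc_mean", 2), ("fc_logstd", 2)] ++
         [(("network" : String), (3 : Nat)), ("net", 3), ("model", 3)]) from rfl,
      List.foldl_append, List.foldl_append, pvStep_ppo]
  cases hp : pvPpoKey k
  · simp only [hp, Bool.false_eq_true, if_false]
    rw [pvStep_sac]
    cases hs : pvSacKey k
    · simp only [hs, Bool.false_eq_true, if_false]
      rw [pvStep_dqn]
    · simp only [hs, if_true]
      simp [pvStep]
  · simp only [hp, if_true]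
    rw [pvStep_zero, pvStep_zero]

theorem pvRank_le (k : String) : pvRank k ≤ 5 := by
  rw [pvRank_eq]; split_ifs <;> omega

-- the running minimum of the ranks equals the staged any-classification of the keys
theorem pv_best (l : List String) (m : Nat) (hm : m ≤ 5) :
    (l.map pvRank).foldl min m
    = min m (if l.any pvPpoKey then 0 else if l.any pvSacKey then 2 else if l.any pvDqnKey then 3 else 5) := by
  induction l generalizing m with
  | nil => simp; omega
  | cons hd tl ih =>
    simp only [List.map_cons, List.foldl_cons, List.any_cons]
    rw [ih (min m (pvRank hd)) (by have := pvRank_le hd; omega), pvRank_eq]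
    by_cases p1 : pvPpoKey hd <;> by_cases p2 : pvSacKey hd <;> by_cases p3 : pvDqnKey hd <;>
    by_cases t1 : tl.any pvPpoKey <;> by_cases t2 : tl.any pvSacKey <;> by_cases t3 : tl.any pvDqnKey <;>
    simp [p1, p2, p3, t1, t2, t3] <;> omega

-- min((_rank(k) for k in keys), default=5) = the staged any-classification
theorem pv_minD_rank (l : List String) :
    PySem.List.minD (l.map pvRank) (fun y => y) 5
      = (if l.any pvPpoKey then 0 else if l.any pvSacKey then 2 else if l.any pvDqnKey then 3 else 5) := by
  cases l with
  | nil => rfl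
  | cons hd tl =>
    unfold PySem.List.minD
    rw [List.map_cons, PySem.List.min?_id_cons, Option.getD_some,
        pv_best tl (pvRank hd) (pvRank_le hd), pvRank_eq]
    by_cases p1 : pvPpoKey hd <;> by_cases p2 : pvSacKey hd <;> by_cases p3 : pvDqnKey hd <;>
    by_cases t1 : tl.any pvPpoKey <;> by_cases t2 : tl.any pvSacKey <;> by_cases t3 : tl.any pvDqnKey <;>
    simp [p1, p2, p3, t1, t2, t3, List.any_cons] <;> omega

-- ===== VERDICT =====
theorem detect_checkpoint_type_spec : Claim_equal_detect_checkpoint_type := by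
  intro state _
  unfold Spec_detect_checkpoint_type detect_checkpoint_type detect_checkpoint_type_alt
  set ks := PySem.List.dedup (state.map Prod.fst) with hks
  rw [pv_minD_rank]
  by_cases hp : ks.any pvPpoKey <;>
  by_cases hb : ("actor" ∈ ks ∧ ("qf1" ∈ ks ∨ "qf2" ∈ ks)) <;>
  by_cases hs : ks.any pvSacKey <;>
  by_cases hd : ks.any pvDqnKey <;>
  simp [hp, hb, hs, hd] <;> rfl
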